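-- pv_equiv track=rewrite | github.com/PhucQuach1907/PTIT | CodePTIT/Source_Code-main/PYTHON_PTIT/PY01027.py | Check
-- ===== SOURCE A (Python) =====
-- def Check(s):
--     if s[0] != "6":
--         return False
--     for i in range(len(s)):
--         if s[i] != "6" and s[i] != "8":
--             return False
--         if i >= 2 and s[i - 2:i + 1:] == "888":
--             return False
--     return True
-- ===== SOURCE B (Python) =====
-- def Check(s):
--     if s[0] != "6":
--         return False
--     return all(p in ("", "8", "88") for p in s.split("6"))
-- ===== Notes on version B (the rewrite author's own statement) =====
-- stated objective: alternative
-- what changed: Replaces the per-index sliding-window scan (character test plus slice comparison at every position) by a tokenisation: split the string on the separator '6' and check that every resulting run is one of '', '8', '88'; no character-membership test or substring search remains.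
import Mathlib
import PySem

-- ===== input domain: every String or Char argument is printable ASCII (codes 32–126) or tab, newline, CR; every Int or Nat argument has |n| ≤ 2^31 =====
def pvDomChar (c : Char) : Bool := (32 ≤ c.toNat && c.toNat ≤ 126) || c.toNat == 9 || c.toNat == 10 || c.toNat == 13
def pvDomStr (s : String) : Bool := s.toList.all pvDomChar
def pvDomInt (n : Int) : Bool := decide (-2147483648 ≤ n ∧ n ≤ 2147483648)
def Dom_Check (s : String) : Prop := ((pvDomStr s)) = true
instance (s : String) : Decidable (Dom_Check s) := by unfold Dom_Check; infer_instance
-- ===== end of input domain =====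

-- B replaces A's per-index sliding-window scan by a tokenisation: split on '6' and check
-- every run is one of "", "8", "88"; objective: alternative algorithm, same cost.

-- ===== PORT A =====
-- the 'for i in range(len(s))' loop, one step per index; s[i] is in range for i drawn from range(len s), so getD is exact
def checkLoopA (l : List Char) : List Nat → Bool
  | [] => true
  | i :: rest =>
    if l.getD i ' ' ≠ '6' ∧ l.getD i ' ' ≠ '8' then false
    else if 2 ≤ i ∧ PySem.List.slice l (some ((i : Int) - 2)) (some ((i : Int) + 1)) = ['8', '8', '8'] then false
    else checkLoopA l rest

def Check (s : String) : Bool :=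
  match PySem.Str.pyGet? s 0 with
  | none => false      -- s[0] raises IndexError on the empty string; excluded by Pre_Check
  | some c =>
    if c ≠ '6' then false
    else checkLoopA s.toList (List.range s.toList.length)

-- ===== PORT B =====
def Check_alt (s : String) : Bool :=
  match PySem.Str.pyGet? s 0 with
  | none => false      -- s[0] raises IndexError on the empty string; excluded by Pre_Check
  | some c =>
    if c ≠ '6' then false
    else (PySem.Chars.splitOn s.toList ['6']).all      -- s.split("6"); Chars.splitOn is the sep ≠ "" form
      (fun p => p == ([] : List Char) || p == ['8'] || p == ['8', '8'])

-- ===== PRECONDITION & SPEC =====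
-- Pre_ excludes only the empty string, on which A raises IndexError at s[0]
def Pre_Check (s : String) : Prop := s ≠ ""
instance (s : String) : Decidable (Pre_Check s) := by unfold Pre_Check; infer_instance
def pvWitness_Check : String := "6868"

def Spec_Check (s : String) (out : Bool) : Prop := out = Check_alt s
instance (s : String) (out : Bool) : Decidable (Spec_Check s out) := by unfold Spec_Check; infer_instance

-- ===== CLAIM (what is proved, stated in full; the proofs are below) =====
def Claim_equal_Check : Prop := ∀ (s : String), Dom_Check s → Pre_Check s → Spec_Check s (Check s)

-- ===== LEMMAS AND PROOFS =====

-- the common characterisation both sides are reduced to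
def GoodStr (l : List Char) : Prop :=
  (∀ c ∈ l, c = '6' ∨ c = '8') ∧ ¬ ['8', '8', '8'] <:+: l

-- ---------- A side ----------

-- A's loop is a conjunction over the visited indices
lemma checkLoopA_eq_all (l : List Char) (idxs : List Nat) :
    checkLoopA l idxs = true ↔
      ∀ i ∈ idxs, (l.getD i ' ' = '6' ∨ l.getD i ' ' = '8') ∧
        ¬ (2 ≤ i ∧ PySem.List.slice l (some ((i : Int) - 2)) (some ((i : Int) + 1)) = ['8', '8', '8']) := by
  induction idxs with
  | nil => simp [checkLoopA]
  | cons i rest ih =>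
    simp only [checkLoopA]
    split_ifs with h1 h2
    · simp only [List.mem_cons]
      constructor
      · intro h; cases h
      · intro h
        rcases (h i (Or.inl rfl)).1 with h' | h' <;> simp only [List.getD] at h'
        · exact h1.1 h'
        · exact h1.2 h'
    · simp only [List.mem_cons]
      constructor
      · intro h; cases h
      · intro h; exact (h i (Or.inl rfl)).2 h2
    · rw [ih]
      constructor
      · intro h i' hi'
        rcases List.mem_cons.1 hi' with rfl | hm
        · exact ⟨by tauto, h2⟩
        · exact h i' hm
      · intro h i' hi'; exact h i' (List.mem_cons_of_mem _ hi')

-- the slice A compares at index i (2 ≤ i) is the 3-window ending at i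
lemma slice_window (l : List Char) (i : Nat) (h2 : 2 ≤ i) :
    PySem.List.slice l (some ((i : Int) - 2)) (some ((i : Int) + 1)) = (l.drop (i - 2)).take 3 := by
  have ha : ((i : Int) - 2) = ((i - 2 : Nat) : Int) := by omega
  have hb : ((i : Int) + 1) = ((i + 1 : Nat) : Int) := by omega
  rw [ha, hb, PySem.List.slice_natCast]
  congr 1
  omega

-- the loop's window test over all indices is exactly the "888"-substring test
lemma window_iff_infix (l : List Char) :
    (∃ i, i < l.length ∧ 2 ≤ i ∧
        PySem.List.slice l (some ((i : Int) - 2)) (some ((i : Int) + 1)) = ['8', '8', '8'])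
      ↔ ['8', '8', '8'] <:+: l := by
  constructor
  · rintro ⟨i, hlt, h2, hsl⟩
    rw [slice_window l i h2] at hsl
    have hpre : ['8', '8', '8'] <+: l.drop (i - 2) := by
      rw [List.prefix_iff_eq_take]; exact hsl.symm
    exact hpre.isInfix.trans (l.drop_suffix _).isInfix
  · intro hinf
    obtain ⟨j, hpre⟩ := (PySem.Chars.exists_prefix_drop_iff_isIn (sub := ['8','8','8']) (s := l)).2
      ((PySem.Chars.isIn_iff_infix _ _).2 hinf)
    have hlen : j + 3 ≤ l.length := by
      have := hpre.length_le
      simp at this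
      omega
    refine ⟨j + 2, by omega, by omega, ?_⟩
    rw [slice_window l (j + 2) (by omega)]
    have : j + 2 - 2 = j := by omega
    rw [this]
    obtain ⟨t, ht⟩ := hpre
    rw [← ht]
    simp

-- A's loop over all indices decides GoodStr
lemma loopA_iff_good (l : List Char) :
    checkLoopA l (List.range l.length) = true ↔ GoodStr l := by
  rw [checkLoopA_eq_all]
  unfold GoodStr
  constructor
  · intro h
    refine ⟨?_, ?_⟩
    · intro c hc
      obtain ⟨i, hi, rfl⟩ := List.getElem_of_mem hc
      have := (h i (List.mem_range.2 hi)).1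
      rwa [List.getD_eq_getElem l ' ' hi] at this
    · intro hinf
      obtain ⟨i, hlt, h2, hsl⟩ := (window_iff_infix l).2 hinf
      exact (h i (List.mem_range.2 hlt)).2 ⟨h2, hsl⟩
  · rintro ⟨hall, hnin⟩ i hi
    have hi' := List.mem_range.1 hi
    refine ⟨?_, ?_⟩
    · rw [List.getD_eq_getElem l ' ' hi']
      exact hall l[i] (List.getElem_mem hi')
    · rintro ⟨h2, hsl⟩
      exact hnin ((window_iff_infix l).1 ⟨i, hi', h2, hsl⟩)

-- ---------- B side ----------

-- composing two head modifications
lemma modifyHead_modifyHead {α : Type} (f g : α → α) (l : List α) :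
    List.modifyHead f (List.modifyHead g l) = List.modifyHead (fun a => f (g a)) l := by
  cases l <;> simp

-- PySem's fuelled split with a single-character separator is core's List.splitOn
lemma splitOn_go_spec (fuel : Nat) (l cur : List Char) (acc : List (List Char)) (h : l.length < fuel) :
    PySem.Chars.splitOn.go ['6'] fuel l cur acc =
      acc.reverse ++ (l.splitOn '6').modifyHead (cur.reverse ++ ·) := by
  induction fuel generalizing l cur acc with
  | zero => omega
  | succ fuel ih =>
    cases l with
    | nil =>
      simp [PySem.Chars.splitOn.go, List.splitOn, List.splitOnP_nil]
    | cons c rest =>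
      by_cases hc : c = '6'
      · subst hc
        have hpre : List.isPrefixOf ['6'] ('6' :: rest) = true := by
          simp [List.isPrefixOf]
        rw [show PySem.Chars.splitOn.go ['6'] (fuel + 1) ('6' :: rest) cur acc =
              PySem.Chars.splitOn.go ['6'] fuel (List.drop 1 ('6' :: rest)) [] (cur.reverse :: acc) by
            simp [PySem.Chars.splitOn.go, hpre]]
        rw [ih _ _ _ (by simpa using Nat.lt_of_succ_lt_succ h)]
        simp only [List.drop_one, List.tail_cons, List.reverse_cons, List.splitOn,
          List.splitOnP_cons]
        simp [List.modifyHead]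
        cases hsp : rest.splitOnP (· == '6') <;> simp
      · have hpre : List.isPrefixOf ['6'] (c :: rest) = false := by
          simp only [List.isPrefixOf, Bool.and_eq_false_iff, beq_eq_false_iff_ne, ne_eq]
          exact Or.inl fun h => hc h.symm
        rw [show PySem.Chars.splitOn.go ['6'] (fuel + 1) (c :: rest) cur acc =
              PySem.Chars.splitOn.go ['6'] fuel rest (c :: cur) acc by
            simp [PySem.Chars.splitOn.go, hpre]]
        rw [ih _ _ _ (by simpa using Nat.lt_of_succ_lt_succ h)]
        simp only [List.splitOn, List.splitOnP_cons, beq_iff_eq, hc, if_false]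
        rw [modifyHead_modifyHead]
        simp

lemma splitOn_eq (l : List Char) : PySem.Chars.splitOn l ['6'] = l.splitOn '6' := by
  unfold PySem.Chars.splitOn
  rw [splitOn_go_spec _ _ _ _ (by omega)]
  simp only [List.reverse_nil, List.nil_append]
  cases List.splitOn '6' l <;> simp

-- no separator occurs inside a part
lemma not_mem_splitOn (l : List Char) : ∀ p ∈ l.splitOn '6', '6' ∉ p := by
  induction l with
  | nil => simp [List.splitOn, List.splitOnP_nil]
  | cons c rest ih =>
    simp only [List.splitOn, List.splitOnP_cons] at *
    by_cases hc : c = '6'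
    · subst hc
      simp only [beq_self_eq_true, if_true]
      intro p hp
      rcases List.mem_cons.1 hp with rfl | hm
      · simp
      · exact ih p hm
    · simp only [beq_iff_eq, hc, if_false]
      cases hsp : rest.splitOnP (· == '6') with
      | nil => simp
      | cons q qs =>
        rw [hsp] at ih
        intro p hp
        rcases List.mem_cons.1 (by simpa using hp) with rfl | hm
        · intro hmem
          rcases List.mem_cons.1 hmem with h | h
          · exact hc h.symm
          · exact ih q (List.mem_cons_self ..) h
        · exact ih p (List.mem_cons_of_mem _ hm)

-- unfolding one separator of an intercalation
lemma intercalate_cons_cons' (s p q : List Char) (qs : List (List Char)) :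
    s.intercalate (p :: q :: qs) = p ++ s ++ s.intercalate (q :: qs) := by
  simp [List.intercalate, List.intersperse]

-- a member of an intercalation is the separator or comes from a part
lemma mem_intercalate (parts : List (List Char)) (c : Char)
    (h : c ∈ [('6' : Char)].intercalate parts) : c = '6' ∨ ∃ p ∈ parts, c ∈ p := by
  induction parts with
  | nil => simp [List.intercalate] at h
  | cons p ps ih =>
    cases ps with
    | nil =>
      simp [List.intercalate] at h
      exact Or.inr ⟨p, by simp, h⟩
    | cons q qs =>
      rw [intercalate_cons_cons' ..] at h
      rcases List.mem_append.1 h with h1 | h1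
      · rcases List.mem_append.1 h1 with h2 | h2
        · exact Or.inr ⟨p, by simp, h2⟩
        · left; simpa using h2
      · rcases ih h1 with h2 | ⟨p', hp', hc⟩
        · exact Or.inl h2
        · exact Or.inr ⟨p', List.mem_cons_of_mem _ hp', hc⟩

-- each part is an infix of the intercalation
lemma part_infix_intercalate (parts : List (List Char)) (p : List Char) (hp : p ∈ parts) :
    p <:+: [('6' : Char)].intercalate parts := by
  induction parts with
  | nil => cases hp
  | cons q qs ih =>
    cases qs with
    | nil =>
      simp at hp
      subst hp
      simp [List.intercalate]
    | cons r rs =>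
      rw [intercalate_cons_cons' ..]
      rcases List.mem_cons.1 hp with rfl | hm
      · exact ((List.prefix_append p ['6']).trans (List.prefix_append _ _)).isInfix
      · exact (ih hm).trans (List.suffix_append _ _).isInfix

-- an occurrence of a '6'-free word in u ++ '6' :: v lies in u or in v
lemma infix_across_sep (sub u v : List Char) (h6 : '6' ∉ sub)
    (h : sub <:+: u ++ '6' :: v) : sub <:+: u ∨ sub <:+: v := by
  obtain ⟨a, b, hab⟩ := h
  by_cases hcase : a.length + sub.length ≤ u.length
  · -- the occurrence ends inside u
    left
    have h1 : a ++ sub <+: u ++ '6' :: v := ⟨b, by simpa [List.append_assoc] using hab⟩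
    have h2 : (a ++ sub) <+: u :=
      List.prefix_of_prefix_length_le h1 (List.prefix_append u _) (by simp; omega)
    exact (List.suffix_append a sub).isInfix.trans h2.isInfix
  · by_cases hcase2 : u.length + 1 ≤ a.length
    · -- the occurrence starts after the separator
      right
      have h1 : sub ++ b <:+ u ++ '6' :: v := ⟨a, by simpa [List.append_assoc] using hab⟩
      have hlen : (sub ++ b).length ≤ v.length := by
        have := congrArg List.length hab
        simp at this
        simp
        omega
      have h2 : sub ++ b <:+ v :=
        List.suffix_of_suffix_length_le h1 (List.suffix_cons '6' v |>.trans (List.suffix_append u _)) (by simpa using hlen)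
      exact (List.prefix_append sub b).isInfix.trans h2.isInfix
    · -- the occurrence covers the separator: '6' would be inside sub
      exfalso
      apply h6
      have hd : a.length ≤ u.length := by omega
      have hlt : u.length - a.length < sub.length := by omega
      have hidx : (a ++ (sub ++ b))[u.length]? = some '6' := by
        rw [show a ++ (sub ++ b) = u ++ '6' :: v by simpa [List.append_assoc] using hab]
        rw [List.getElem?_append_right (le_refl u.length)]
        simp
      rw [List.getElem?_append_right hd,
        List.getElem?_append_left hlt] at hidx
      exact List.mem_of_getElem? hidx

-- an intercalation of short all-'8' parts contains no "888"
lemma no888_intercalate (parts : List (List Char))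
    (hok : ∀ p ∈ parts, p = [] ∨ p = ['8'] ∨ p = ['8', '8']) :
    ¬ ['8', '8', '8'] <:+: [('6' : Char)].intercalate parts := by
  induction parts with
  | nil => simp [List.intercalate]
  | cons p ps ih =>
    have hshort : ∀ q, q = ([] : List Char) ∨ q = ['8'] ∨ q = ['8', '8'] →
        ¬ ['8', '8', '8'] <:+: q := by
      rintro q (rfl | rfl | rfl) h <;> exact absurd h.length_le (by simp)
    cases ps with
    | nil =>
      simpa [List.intercalate] using hshort p (hok p (by simp))
    | cons q qs =>
      rw [intercalate_cons_cons' ..]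
      intro h
      rw [List.append_assoc, show ['6'] ++ [('6' : Char)].intercalate (q :: qs) =
        '6' :: [('6' : Char)].intercalate (q :: qs) by simp] at h
      rcases infix_across_sep _ _ _ (by decide) h with h1 | h1
      · exact hshort p (hok p (by simp)) h1
      · exact ih (fun r hr => hok r (List.mem_cons_of_mem _ hr)) h1

-- B's token test decides GoodStr
lemma splitOn_all_iff_good (l : List Char) :
    ((l.splitOn '6').all
      (fun p => p == ([] : List Char) || p == ['8'] || p == ['8', '8'])) = true ↔ GoodStr l := by
  rw [List.all_eq_true]
  unfold GoodStr
  constructor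
  · intro h
    have hok : ∀ p ∈ l.splitOn '6', p = [] ∨ p = ['8'] ∨ p = ['8', '8'] := by
      intro p hp
      have := h p hp
      simpa [Bool.or_eq_true, beq_iff_eq, or_assoc] using this
    constructor
    · intro c hc
      rw [← List.intercalate_splitOn l '6'] at hc
      rcases mem_intercalate _ c hc with h1 | ⟨p, hp, hcp⟩
      · exact Or.inl h1
      · rcases hok p hp with rfl | rfl | rfl
        · cases hcp
        · right; simpa using hcp
        · right; rcases List.mem_cons.1 hcp with rfl | h2
          · rfl
          · simpa using h2
    · rw [← List.intercalate_splitOn l '6']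
      exact no888_intercalate _ hok
  · rintro ⟨hall, hnin⟩ p hp
    have h6 : '6' ∉ p := not_mem_splitOn l p hp
    have hinf : p <:+: l := by
      have := part_infix_intercalate _ p hp
      rwa [List.intercalate_splitOn l '6'] at this
    have h8 : ∀ c ∈ p, c = '8' := by
      intro c hc
      rcases hall c (hinf.mem hc) with rfl | rfl
      · exact absurd hc h6
      · rfl
    have hrep : p = List.replicate p.length '8' := by
      rw [List.eq_replicate_iff]; exact ⟨rfl, h8⟩
    have hlen : p.length ≤ 2 := by
      by_contra hgt
      apply hnin
      have hpre : ['8', '8', '8'] <+: p := by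
        rw [hrep, List.prefix_iff_eq_take, List.take_replicate,
          show min (['8', '8', '8'] : List Char).length p.length = 3 by simp; omega]
        rfl
      exact hpre.isInfix.trans hinf
    rw [hrep]
    interval_cases h : p.length <;> simp

-- ===== VERDICT (by name: the statement is the Claim_ definition above) =====
theorem Check_spec : Claim_equal_Check := by
  intro s _ _
  unfold Spec_Check Check Check_alt
  cases h : PySem.Str.pyGet? s 0 with
  | none => rfl
  | some c =>
    simp only
    split_ifs with hc
    · rfl
    · rw [splitOn_eq, Bool.eq_iff_iff, loopA_iff_good, splitOn_all_iff_good]
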